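-- pv_equiv track=rewrite | github.com/Sahil624/myChain | blockchain.py | create_proof_of_work
-- ===== SOURCE A (Python) =====
-- def create_proof_of_work(prev_proof):
-- 	proof = prev_proof + 1
-- 	"""
-- 		Proof of work algorithm
-- 	"""
-- 	while (proof + prev_proof) % 7 != 0:
-- 		proof += 1
--
-- 	return proof
-- ===== SOURCE B (Python) =====
-- def create_proof_of_work(prev_proof):
-- 	r = (-2 * prev_proof) % 7
-- 	return prev_proof + (7 if r == 0 else r)
-- ===== Notes on version B (the rewrite author's own statement) =====
-- stated objective: simpler
-- what changed: Replaced the linear search loop with a closed-form modular-arithmetic formula: r = (-2*prev_proof) mod seven, answer = prev_proof plus (seven if r is zero else r).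
import Mathlib
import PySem

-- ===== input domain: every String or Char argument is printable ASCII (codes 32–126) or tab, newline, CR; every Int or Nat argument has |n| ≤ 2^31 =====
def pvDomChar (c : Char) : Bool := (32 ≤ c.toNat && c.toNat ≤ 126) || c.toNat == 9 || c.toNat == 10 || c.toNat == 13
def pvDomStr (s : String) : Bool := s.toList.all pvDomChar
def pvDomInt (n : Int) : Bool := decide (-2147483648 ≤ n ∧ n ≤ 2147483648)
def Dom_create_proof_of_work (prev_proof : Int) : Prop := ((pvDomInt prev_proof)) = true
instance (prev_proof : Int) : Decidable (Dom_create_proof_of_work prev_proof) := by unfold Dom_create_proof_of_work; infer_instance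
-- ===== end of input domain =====

-- B replaces A's while-loop search with a closed-form modular-arithmetic formula (simpler).
-- ===== PORT A =====
-- while loop ported as bounded recursion: the loop always exits within 7 steps
-- (fuel 7 only makes the same computation total; same steps, same state)
def pvPowLoop : Nat → Int → Int → Int
  | 0, _, proof => proof
  | n+1, prev_proof, proof =>
      if PySem.Int.mod (proof + prev_proof) 7 ≠ 0 then pvPowLoop n prev_proof (proof + 1)
      else proof

def create_proof_of_work (prev_proof : Int) : Int :=
  pvPowLoop 7 prev_proof (prev_proof + 1)

-- ===== PORT B =====
def create_proof_of_work_alt (prev_proof : Int) : Int :=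
  let r := PySem.Int.mod (-2 * prev_proof) 7
  prev_proof + (if r = 0 then 7 else r)

-- ===== PRECONDITION & SPEC =====
def Spec_create_proof_of_work (prev_proof : Int) (out : Int) : Prop := out = create_proof_of_work_alt prev_proof
instance (prev_proof : Int) (out : Int) : Decidable (Spec_create_proof_of_work prev_proof out) := by unfold Spec_create_proof_of_work; infer_instance

-- ===== CLAIM (what is proved, stated in full; the proofs are below) =====
def Claim_equal_create_proof_of_work : Prop := ∀ (prev_proof : Int), Dom_create_proof_of_work prev_proof → Spec_create_proof_of_work prev_proof (create_proof_of_work prev_proof)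

-- ===== LEMMAS AND PROOFS =====

-- ===== VERDICT (by name: the statement is the Claim_ definition above) =====
theorem create_proof_of_work_spec : Claim_equal_create_proof_of_work := by
  intro prev_proof _
  unfold Spec_create_proof_of_work create_proof_of_work create_proof_of_work_alt
  simp only [pvPowLoop, show ∀ a : Int, PySem.Int.mod a 7 = a % 7 from
    fun a => PySem.Int.mod_eq_emod_of_pos (by norm_num)]
  have hr : prev_proof % 7 = 0 ∨ prev_proof % 7 = 1 ∨ prev_proof % 7 = 2 ∨
      prev_proof % 7 = 3 ∨ prev_proof % 7 = 4 ∨ prev_proof % 7 = 5 ∨ prev_proof % 7 = 6 := by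
    omega
  split_ifs <;> rcases hr with h | h | h | h | h | h | h <;> omega
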